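-- pv_equiv track=rewrite | github.com/jcchouz/leetcode | nowcoder_mianshibishuatop101/BM92.最长无重复子数组.py | maxLength2
-- ===== SOURCE A (Python) =====
-- from typing import List
-- from collections import deque
--
-- def maxLength2(arr: List[int]) -> int:
--     # write code here
--     q = deque()
--     res = 0
--     for num in arr:
--         while num in list(q):
--             q.popleft()
--         q.append(num)
--         res = max(res, len(q))
--     return res
-- ===== SOURCE B (Python) =====
-- def maxLength2(arr):
--     last = {}
--     left = 0
--     res = 0
--     for i, num in enumerate(arr):
--         j = last.get(num, -1)
--         if j >= left:
--             left = j + 1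
--         last[num] = i
--         res = max(res, i - left + 1)
--     return res
-- ===== Notes on version B (the rewrite author's own statement) =====
-- stated objective: faster
-- what changed: Replaced the deque with a repeated linear membership scan and element-by-element popleft (O(n^2)) by a one-pass sliding window that keeps a dict of each value's last index and jumps the left boundary directly past the previous occurrence (O(n)).
import Mathlib
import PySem

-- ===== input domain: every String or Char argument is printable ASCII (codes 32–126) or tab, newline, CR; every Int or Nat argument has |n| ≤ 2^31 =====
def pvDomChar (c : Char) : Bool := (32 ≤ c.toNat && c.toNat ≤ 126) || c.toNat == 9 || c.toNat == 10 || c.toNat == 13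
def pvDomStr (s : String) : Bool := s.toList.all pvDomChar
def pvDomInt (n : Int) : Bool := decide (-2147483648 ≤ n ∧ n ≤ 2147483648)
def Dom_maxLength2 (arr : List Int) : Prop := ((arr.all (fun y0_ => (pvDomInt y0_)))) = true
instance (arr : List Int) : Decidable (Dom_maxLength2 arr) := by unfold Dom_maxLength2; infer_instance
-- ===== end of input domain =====

-- B replaces A's deque with repeated linear scans (O(n^2)) by a one-pass sliding
-- window over last-seen indices (objective: faster, asymptotically).

-- ===== PORT A =====
-- 'while num in list(q): q.popleft()'
def popA (num : Int) : List Int → List Int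
  | [] => []
  | x :: rest => if num ∈ x :: rest then popA num rest else x :: rest

-- one iteration of A's for-loop: state is (q, res)
def stepA (st : List Int × Int) (num : Int) : List Int × Int :=
  let q := popA num st.1 ++ [num]
  (q, max st.2 (q.length : Int))

def maxLength2 (arr : List Int) : Int :=
  (arr.foldl stepA ([], 0)).2

-- ===== PORT B =====
-- one iteration of B's for-loop over enumerate(arr): state is (last, left, res)
def stepB (st : PySem.Dict Int Int × Int × Int) (p : Int × Int) : PySem.Dict Int Int × Int × Int :=
  let j := st.1.getD p.2 (-1)
  let left := if st.2.1 ≤ j then j + 1 else st.2.1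
  (st.1.insert p.2 p.1, left, max st.2.2 (p.1 - left + 1))

def maxLength2_alt (arr : List Int) : Int :=
  ((PySem.List.enumerate arr 0).foldl stepB (PySem.Dict.empty, 0, 0)).2.2

-- ===== PRECONDITION & SPEC =====
def Spec_maxLength2 (arr : List Int) (out : Int) : Prop := out = maxLength2_alt arr
instance (arr : List Int) (out : Int) : Decidable (Spec_maxLength2 arr out) := by unfold Spec_maxLength2; infer_instance

-- ===== CLAIM (what is proved, stated in full; the proofs are below) =====
def Claim_equal_maxLength2 : Prop := ∀ (arr : List Int), Dom_maxLength2 arr → Spec_maxLength2 arr (maxLength2 arr)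

-- ===== LEMMAS AND PROOFS =====

-- the 'last' dict maps each seen value to the index of its last occurrence in the prefix p
def LastInv (p : List Int) (last : PySem.Dict Int Int) : Prop :=
  ∀ v : Int, (last.getD v (-1) = -1 ∧ v ∉ p) ∨
    (∃ j : Nat, last.getD v (-1) = (j : Int) ∧ j < p.length ∧ p[j]? = some v ∧ v ∉ p.drop (j + 1))

lemma popA_of_not_mem (num : Int) (q : List Int) (h : num ∉ q) : popA num q = q := by
  cases q with
  | nil => rfl
  | cons x rest => simp [popA, h]

lemma popA_spec (num : Int) (a b : List Int) (hb : num ∉ b) :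
    popA num (a ++ num :: b) = b := by
  induction a with
  | nil => simp [popA, hb, popA_of_not_mem]
  | cons x a ih => simp [popA, ih]

lemma mem_window_iff (p : List Int) (l : Nat) (last : PySem.Dict Int Int)
    (hl : LastInv p last) (num : Int) :
    num ∈ p.drop l ↔ (l : Int) ≤ last.getD num (-1) := by
  constructor
  · intro hmem
    rcases hl num with ⟨_, hnp⟩ | ⟨j, hget, hjlen, hgetj, hnd⟩
    · exact absurd (List.mem_of_mem_drop hmem) hnp
    · rw [hget]
      by_contra hlt
      have hjl : j + 1 ≤ l := by omega
      have : num ∈ p.drop (j + 1) := by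
        have := hmem
        rw [show l = (j+1) + (l - (j+1)) by omega, ← List.drop_drop] at this
        exact List.mem_of_mem_drop this
      exact hnd this
  · intro hge
    rcases hl num with ⟨hget, _⟩ | ⟨j, hget, hjlen, hgetj, _⟩
    · rw [hget] at hge; omega
    · rw [hget] at hge
      have hlj : l ≤ j := by exact_mod_cast hge
      refine List.mem_iff_getElem?.mpr ⟨j - l, ?_⟩
      rw [List.getElem?_drop, show l + (j - l) = j by omega]
      exact hgetj

lemma lastInv_insert (p : List Int) (num : Int) (last : PySem.Dict Int Int)
    (h : LastInv p last) : LastInv (p ++ [num]) (last.insert num (p.length : Int)) := by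
  intro v
  by_cases hv : v = num
  · subst hv
    refine Or.inr ⟨p.length, ?_, by simp, ?_, ?_⟩
    · simp
    · simp
    · have : (p ++ [v]).drop (p.length + 1) = [] := by
        apply List.drop_eq_nil_of_le; simp
      simp [this]
  · rw [PySem.Dict.getD_insert, if_neg hv]
    rcases h v with ⟨hget, hnp⟩ | ⟨j, hget, hjlen, hgetj, hnd⟩
    · exact Or.inl ⟨hget, by simp [hv, hnp]⟩
    · refine Or.inr ⟨j, hget, by simp; omega, ?_, ?_⟩
      · rw [List.getElem?_append_left hjlen]; exact hgetj
      · rw [List.drop_append_of_le_length (by omega)]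
        simp [hv, hnd]

-- main loop invariant: running A's loop on (p.drop l, res) and B's loop on
-- (last, l, res) over the same remaining input gives the same result
lemma loop_eq (rest p : List Int) (l : Nat) (last : PySem.Dict Int Int) (res : Int)
    (hlp : l ≤ p.length) (hnd : (p.drop l).Nodup) (hl : LastInv p last) :
    (rest.foldl stepA (p.drop l, res)).2
      = ((PySem.List.enumerate rest (p.length : Int)).foldl stepB (last, (l : Int), res)).2.2 := by
  induction rest generalizing p l last res hlp hnd hl with
  | nil => simp [PySem.List.enumerate_nil]
  | cons num rest ih =>
    rw [PySem.List.enumerate_cons, List.foldl_cons, List.foldl_cons]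
    by_cases hmem : num ∈ p.drop l
    · -- num is in the window: A pops up to and past its occurrence, B jumps left
      rcases hl num with ⟨_, hnp⟩ | ⟨j, hget, hjlen, hgetj, hnd2⟩
      · exact absurd (List.mem_of_mem_drop hmem) hnp
      have hlj : l ≤ j := by
        have := (mem_window_iff p l last hl num).mp hmem
        rw [hget] at this; exact_mod_cast this
      have hpj : p[j] = num := by
        have := List.getElem?_eq_some_iff.mp hgetj; exact this.2
      have hdecomp : p.drop l = (p.drop l).take (j - l) ++ num :: p.drop (j + 1) := by
        conv_lhs => rw [← List.take_append_drop (j - l) (p.drop l)]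
        rw [List.drop_drop, show l + (j - l) = j by omega,
          List.drop_eq_getElem_cons hjlen, hpj]
      have hpop : popA num (p.drop l) = p.drop (j + 1) := by
        rw [hdecomp, popA_spec num _ _ hnd2]
      have hstepA : stepA (p.drop l, res) num
          = ((p ++ [num]).drop (j + 1), max res (((p ++ [num]).drop (j + 1)).length : Int)) := by
        simp only [stepA, hpop]
        rw [List.drop_append_of_le_length (by omega)]
      have hstepB : stepB (last, (l : Int), res) ((p.length : Int), num)
          = (last.insert num (p.length : Int), ((j : Int) + 1),
             max res ((p.length : Int) - ((j : Int) + 1) + 1)) := by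
        simp only [stepB, hget]
        rw [if_pos (show (l : Int) ≤ (j : Int) by exact_mod_cast hlj)]
      rw [hstepA, hstepB]
      have hlen : (((p ++ [num]).drop (j + 1)).length : Int)
          = (p.length : Int) - ((j : Int) + 1) + 1 := by
        rw [List.drop_append_of_le_length (by omega)]
        simp; omega
      rw [hlen]
      have hnodup' : ((p ++ [num]).drop (j + 1)).Nodup := by
        rw [List.drop_append_of_le_length (by omega)]
        have hsub : List.Sublist (p.drop (j + 1)) (p.drop l) := by
          rw [show j + 1 = l + (j + 1 - l) by omega, ← List.drop_drop]
          exact List.drop_sublist _ _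
        have : (p.drop (j + 1)).Nodup := hnd.sublist hsub
        simp [List.nodup_append, this]
        exact fun a ha h => hnd2 (h ▸ ha)
      have := ih (p ++ [num]) (j + 1) (last.insert num (p.length : Int))
        (max res ((p.length : Int) - ((j : Int) + 1) + 1))
        (by simp; omega) hnodup' (lastInv_insert p num last hl)
      simpa [Int.add_comm] using this
    · -- num not in the window: A pops nothing, B keeps left
      have hnotle : ¬ ((l : Int) ≤ last.getD num (-1)) := fun hc =>
        hmem ((mem_window_iff p l last hl num).mpr hc)
      have hstepA : stepA (p.drop l, res) num
          = ((p ++ [num]).drop l, max res (((p ++ [num]).drop l).length : Int)) := by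
        simp only [stepA, popA_of_not_mem num _ hmem]
        rw [List.drop_append_of_le_length hlp]
      have hstepB : stepB (last, (l : Int), res) ((p.length : Int), num)
          = (last.insert num (p.length : Int), (l : Int),
             max res ((p.length : Int) - (l : Int) + 1)) := by
        simp only [stepB, if_neg hnotle]
      rw [hstepA, hstepB]
      have hlen : (((p ++ [num]).drop l).length : Int)
          = (p.length : Int) - (l : Int) + 1 := by
        rw [List.drop_append_of_le_length hlp]
        simp; omega
      rw [hlen]
      have hnodup' : ((p ++ [num]).drop l).Nodup := by
        rw [List.drop_append_of_le_length hlp]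
        simp [List.nodup_append, hnd]
        exact fun a ha h => hmem (h ▸ ha)
      have := ih (p ++ [num]) l (last.insert num (p.length : Int))
        (max res ((p.length : Int) - (l : Int) + 1))
        (by simp; omega) hnodup' (lastInv_insert p num last hl)
      simpa [Int.add_comm] using this

theorem maxLength2_spec : Claim_equal_maxLength2 := by
  intro arr _
  show maxLength2 arr = maxLength2_alt arr
  have h := loop_eq arr [] 0 PySem.Dict.empty 0 (by simp) (by simp)
    (by intro v; left; simp [PySem.Dict.getD_empty])
  simpa [maxLength2, maxLength2_alt] using h
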